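-- pv_equiv track=rewrite | github.com/cctbx/cctbx_project | qttbx/viewers/last/cif_io.py | check_for_semicolon
-- ===== SOURCE A (Python) =====
-- def check_for_semicolon(current_line_index, lines, used_semicolons):
--     start = None
--     end = None
--     text_between_semicolons = []
--
--     for i in range(current_line_index - 1, len(lines)):
--         for j, char in enumerate(lines[i]):
--             if char == ';' and (i, j) not in used_semicolons:
--                 if start is None:
--                     start = (i, j)
--                 else:
--                     end = (i, j)
--                     break
--         if start is not None:
--             text_between_semicolons.append(lines[i])
--         if end is not None:
--             break
--
--     if start and end:
--         used_semicolons.extend([start, end])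
--         joined_text = ''.join(text_between_semicolons)
--         # Remove the semicolons and anything before/after them in the start/end lines
--         joined_text = joined_text[joined_text.find(';') + 1:joined_text.rfind(';')]
--         return joined_text, used_semicolons
--     else:
--         return None, used_semicolons
-- ===== SOURCE B (Python) =====
-- def check_for_semicolon(current_line_index, lines, used_semicolons):
--     # Data-flow pipeline: flatten the scanned region into one big string plus a
--     # position->coordinate table, filter the unused semicolons out of it, then
--     # cut the answer directly out of the big string via line-start offsets.
--     lo = current_line_index - 1
--     segs = [lines[i] for i in range(lo, len(lines))]
--     big = ''.join(segs)
--     offs = [0]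
--     for s in segs:
--         offs.append(offs[-1] + len(s))
--     coords_of = [(lo + k, j) for k, s in enumerate(segs) for j in range(len(s))]
--     used = set(used_semicolons)
--     hits = [c for c, ch in zip(coords_of, big) if ch == ';' and c not in used]
--     if len(hits) < 2:
--         return None, used_semicolons
--     start, end = hits[0], hits[1]
--     used_semicolons.extend([start, end])
--     seg = big[offs[start[0] - lo]:offs[end[0] - lo + 1]]
--     return seg[seg.find(';') + 1:seg.rfind(';')], used_semicolons
-- ===== Notes on version B (the rewrite author's own statement) =====
-- stated objective: alternative
-- what changed: B replaces A's stateful nested loop (start/end state machine with two breaks and incremental text accumulation) by a data-flow pipeline: it flattens the scanned region into one big string with a position-to-coordinate table and a line-offset table, filters the unused semicolons as a single comprehension over the flattened pairs, takes the first two, and cuts the returned text directly out of the pre-joined big string by offsets instead of re-joining lines.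
import Mathlib
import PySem

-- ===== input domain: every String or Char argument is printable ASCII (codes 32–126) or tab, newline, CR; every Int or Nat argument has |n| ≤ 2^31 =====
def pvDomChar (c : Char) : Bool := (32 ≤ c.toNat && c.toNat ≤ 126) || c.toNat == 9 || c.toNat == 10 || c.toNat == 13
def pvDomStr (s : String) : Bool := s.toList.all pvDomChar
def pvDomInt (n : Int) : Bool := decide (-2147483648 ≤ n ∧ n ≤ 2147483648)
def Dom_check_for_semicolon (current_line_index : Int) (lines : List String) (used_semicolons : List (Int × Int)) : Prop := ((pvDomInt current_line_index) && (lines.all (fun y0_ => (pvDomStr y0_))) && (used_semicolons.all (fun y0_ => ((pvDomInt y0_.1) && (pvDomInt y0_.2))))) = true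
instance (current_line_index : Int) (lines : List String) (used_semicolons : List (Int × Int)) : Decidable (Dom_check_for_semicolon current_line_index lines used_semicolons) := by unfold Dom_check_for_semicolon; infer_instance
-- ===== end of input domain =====

-- B replaces A's stateful nested scan by a data-flow pipeline (flatten the region into one big
-- string with a coordinate table, filter the unused semicolons, slice by line offsets);
-- equivalence is about the RETURN value only (both Pythons extend used_semicolons identically).

-- ===== PORT A =====
-- inner loop of A: scan one line's enumerated chars, updating start/end, breaking when end is set
def pvAScan (used : List (Int × Int)) (i : Int) :
    List (Int × Char) → Option (Int × Int) → Option (Int × Int) × Option (Int × Int)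
  | [], start => (start, none)
  | (j, c) :: rest, start =>
    if c = ';' ∧ (i, j) ∉ used then
      match start with
      | none => pvAScan used i rest (some (i, j))
      | some s => (some s, some (i, j))
    else pvAScan used i rest start

-- outer loop of A over the line indices, accumulating text_between_semicolons
def pvALoop (lines : List String) (used : List (Int × Int)) :
    List Int → Option (Int × Int) → List String →
    Option (Int × Int) × Option (Int × Int) × List String
  | [], start, texts => (start, none, texts)
  | i :: rest, start, texts =>
    let line := (PySem.List.pyGet? lines i).getD ""
    let r := pvAScan used i (PySem.List.enumerate line.toList) start
    let texts' := if r.1.isSome then texts ++ [line] else texts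
    match r.2 with
    | some e => (r.1, some e, texts')
    | none => pvALoop lines used rest r.1 texts'

def check_for_semicolon (current_line_index : Int) (lines : List String) (used_semicolons : List (Int × Int)) : Option String × (List (Int × Int)) :=
  match pvALoop lines used_semicolons
      (PySem.List.pyRange (current_line_index - 1) lines.length 1) none [] with
  | (some s, some e, texts) =>
    let used' := used_semicolons ++ [s, e]
    let joined := PySem.Str.join "" texts
    (some (PySem.Str.slice joined (some (PySem.Str.find joined ";" + 1)) (some (PySem.Str.rfind joined ";"))), used')
  | (_, _, _) => (none, used_semicolons)

-- ===== PORT B =====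
-- segs = [lines[i] for i in range(lo, len(lines))]
def pvSegs (lo : Int) (lines : List String) : List String :=
  (PySem.List.pyRange lo lines.length 1).map (fun i => (PySem.List.pyGet? lines i).getD "")

-- offs = [0]; for s in segs: offs.append(offs[-1] + len(s))
def pvOffs (segs : List String) : List Int :=
  segs.foldl (fun offs s => offs ++ [offs.getLastD 0 + PySem.Str.len s]) [0]

-- coords_of = [(lo + k, j) for k, s in enumerate(segs) for j in range(len(s))]
def pvCoordsOf (lo : Int) (segs : List String) : List (Int × Int) :=
  (PySem.List.enumerate segs).flatMap
    (fun ks => (PySem.List.pyRange 0 (PySem.Str.len ks.2) 1).map (fun j => (lo + ks.1, j)))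

-- hits = [c for c, ch in zip(coords_of, big) if ch == ';' and c not in used]
def pvHits (usedSet : PySem.Set (Int × Int)) (coords : List (Int × Int)) (big : List Char) : List (Int × Int) :=
  ((coords.zip big).filter (fun p => decide (p.2 = ';' ∧ p.1 ∉ usedSet))).map Prod.fst

def check_for_semicolon_alt (current_line_index : Int) (lines : List String) (used_semicolons : List (Int × Int)) : Option String × (List (Int × Int)) :=
  let lo := current_line_index - 1
  let segs := pvSegs lo lines
  let big := PySem.Str.join "" segs
  let offs := pvOffs segs
  match pvHits (PySem.Set.ofList used_semicolons) (pvCoordsOf lo segs) big.toList with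
  | s :: e :: _ =>
    let seg := PySem.Str.slice big (some ((PySem.List.pyGet? offs (s.1 - lo)).getD 0))
                                   (some ((PySem.List.pyGet? offs (e.1 - lo + 1)).getD 0))
    (some (PySem.Str.slice seg (some (PySem.Str.find seg ";" + 1)) (some (PySem.Str.rfind seg ";"))),
     used_semicolons ++ [s, e])
  | _ => (none, used_semicolons)

-- ===== PRECONDITION & SPEC =====
-- Pre_ excludes exactly the inputs on which Python A raises IndexError (the scan starts at
-- line index current_line_index - 1, which Python wraps; below -len(lines) the lookup raises).
def Pre_check_for_semicolon (current_line_index : Int) (lines : List String) (used_semicolons : List (Int × Int)) : Prop :=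
  -(lines.length : Int) ≤ current_line_index - 1
instance (current_line_index : Int) (lines : List String) (used_semicolons : List (Int × Int)) : Decidable (Pre_check_for_semicolon current_line_index lines used_semicolons) := by unfold Pre_check_for_semicolon; infer_instance
def pvWitness_check_for_semicolon : Int × List String × (List (Int × Int)) := (1, ["a;b", ";c"], [])
def Spec_check_for_semicolon (current_line_index : Int) (lines : List String) (used_semicolons : List (Int × Int)) (out : Option String × (List (Int × Int))) : Prop := out = check_for_semicolon_alt current_line_index lines used_semicolons
instance (current_line_index : Int) (lines : List String) (used_semicolons : List (Int × Int)) (out : Option String × (List (Int × Int))) : Decidable (Spec_check_for_semicolon current_line_index lines used_semicolons out) := by unfold Spec_check_for_semicolon; infer_instance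

-- ===== CLAIM (what is proved, stated in full; the proofs are below) =====
def Claim_equal_check_for_semicolon : Prop := ∀ (current_line_index : Int) (lines : List String) (used_semicolons : List (Int × Int)), Dom_check_for_semicolon current_line_index lines used_semicolons → Pre_check_for_semicolon current_line_index lines used_semicolons → Spec_check_for_semicolon current_line_index lines used_semicolons (check_for_semicolon current_line_index lines used_semicolons)

-- ===== LEMMAS AND PROOFS =====

-- reference scan (proof-side only): collect coordinates of unused semicolons, breaking at two;
-- it mediates between A's start/end state machine and B's filter pipeline
def pvRefScan (usedSet : PySem.Set (Int × Int)) (i : Int) :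
    List (Int × Char) → List (Int × Int) → List (Int × Int)
  | [], coords => coords
  | (j, c) :: rest, coords =>
    if c = ';' ∧ (i, j) ∉ usedSet then
      let coords' := coords ++ [(i, j)]
      if coords'.length = 2 then coords' else pvRefScan usedSet i rest coords'
    else pvRefScan usedSet i rest coords

def pvRefLoop (lines : List String) (usedSet : PySem.Set (Int × Int)) :
    List Int → List (Int × Int) → List (Int × Int)
  | [], coords => coords
  | i :: rest, coords =>
    let line := (PySem.List.pyGet? lines i).getD ""
    let coords' := pvRefScan usedSet i (PySem.List.enumerate line.toList) coords
    if coords'.length = 2 then coords' else pvRefLoop lines usedSet rest coords'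

-- the reference scans simulate A: ref's coordinate list is A's (start, end) pair encoded
theorem pvScan_equiv (used : List (Int × Int)) (i : Int) :
    ∀ (chars : List (Int × Char)) (start : Option (Int × Int)),
      pvRefScan (PySem.Set.ofList used) i chars start.toList =
        (pvAScan used i chars start).1.toList ++ (pvAScan used i chars start).2.toList := by
  intro chars
  induction chars with
  | nil => intro start; cases start <;> simp [pvAScan, pvRefScan]
  | cons jc rest ih =>
    intro start
    obtain ⟨j, c⟩ := jc
    by_cases h : c = ';' ∧ (i, j) ∉ used
    · have h' : c = ';' ∧ (i, j) ∉ PySem.Set.ofList used := by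
        simpa [PySem.Set.mem_ofList] using h
      cases start with
      | none =>
        simp only [pvAScan, pvRefScan, if_pos h, if_pos h']
        simpa using ih (some (i, j))
      | some s =>
        simp [pvAScan, pvRefScan, if_pos h]
    · have h' : ¬ (c = ';' ∧ (i, j) ∉ PySem.Set.ofList used) := by
        simpa [PySem.Set.mem_ofList] using h
      simp only [pvAScan, pvRefScan, if_neg h, if_neg h']
      exact ih start

-- coordinates produced by A's scan of line i have first component i; a set start survives;
-- a set end implies a set start
theorem pvScan_props (used : List (Int × Int)) (i : Int) :
    ∀ (chars : List (Int × Char)) (start : Option (Int × Int)),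
      (start = none → ∀ s, (pvAScan used i chars start).1 = some s → s.1 = i) ∧
      (∀ e, (pvAScan used i chars start).2 = some e →
        e.1 = i ∧ (pvAScan used i chars start).1.isSome) ∧
      (∀ s, start = some s → (pvAScan used i chars start).1 = some s) := by
  intro chars
  induction chars with
  | nil => intro start; cases start <;> simp [pvAScan]
  | cons jc rest ih =>
    intro start
    obtain ⟨j, c⟩ := jc
    by_cases h : c = ';' ∧ (i, j) ∉ used
    · cases start with
      | none =>
        simp only [pvAScan, if_pos h]
        refine ⟨fun _ s hs => ?_, fun e he => (ih (some (i, j))).2.1 e he, fun s hs => by simp at hs⟩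
        have h1 := (ih (some (i, j))).2.2 (i, j) rfl
        rw [h1] at hs
        cases hs
        rfl
      | some s =>
        simp only [pvAScan, if_pos h]
        refine ⟨fun hn => by simp at hn, fun e he => ?_, fun s' hs' => by simpa using hs'⟩
        simp only [Option.some.injEq] at he
        subst he
        simp
    · simp only [pvAScan, if_neg h]
      exact ih start

-- step equations for the loops
theorem pvALoop_cons_end (lines : List String) (used : List (Int × Int))
    (i : Int) (rest : List Int) (start : Option (Int × Int)) (texts : List String)
    (s' : Option (Int × Int)) (e : Int × Int)
    (h : pvAScan used i (PySem.List.enumerate ((PySem.List.pyGet? lines i).getD "").toList) start = (s', some e)) :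
    pvALoop lines used (i :: rest) start texts =
      (s', some e, if s'.isSome then texts ++ [(PySem.List.pyGet? lines i).getD ""] else texts) := by
  simp [pvALoop, h]

theorem pvALoop_cons_go (lines : List String) (used : List (Int × Int))
    (i : Int) (rest : List Int) (start : Option (Int × Int)) (texts : List String)
    (s' : Option (Int × Int))
    (h : pvAScan used i (PySem.List.enumerate ((PySem.List.pyGet? lines i).getD "").toList) start = (s', none)) :
    pvALoop lines used (i :: rest) start texts =
      pvALoop lines used rest s' (if s'.isSome then texts ++ [(PySem.List.pyGet? lines i).getD ""] else texts) := by
  simp [pvALoop, h]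

theorem pvRefLoop_cons (lines : List String) (usedSet : PySem.Set (Int × Int))
    (i : Int) (rest : List Int) (coords coords' : List (Int × Int))
    (h : pvRefScan usedSet i (PySem.List.enumerate ((PySem.List.pyGet? lines i).getD "").toList) coords = coords') :
    pvRefLoop lines usedSet (i :: rest) coords =
      if coords'.length = 2 then coords' else pvRefLoop lines usedSet rest coords' := by
  simp [pvRefLoop, h]

theorem pvLoop_started (lines : List String) (used : List (Int × Int)) :
    ∀ (n : Nat) (i0 : Int) (s : Int × Int) (texts : List String),
      s.1 < i0 →
      texts = (PySem.List.pyRange s.1 i0 1).map (fun k => (PySem.List.pyGet? lines k).getD "") →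
      (pvRefLoop lines (PySem.Set.ofList used) (PySem.List.pyRange i0 (i0 + n) 1) [s] = [s] ∧
        pvALoop lines used (PySem.List.pyRange i0 (i0 + n) 1) (some s) texts =
          (some s, none,
            (PySem.List.pyRange s.1 (i0 + n) 1).map (fun k => (PySem.List.pyGet? lines k).getD ""))) ∨
      (∃ e : Int × Int,
        pvRefLoop lines (PySem.Set.ofList used) (PySem.List.pyRange i0 (i0 + n) 1) [s] = [s, e] ∧
        pvALoop lines used (PySem.List.pyRange i0 (i0 + n) 1) (some s) texts =
          (some s, some e,
            (PySem.List.pyRange s.1 (e.1 + 1) 1).map (fun k => (PySem.List.pyGet? lines k).getD ""))) := by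
  intro n
  induction n with
  | zero =>
    intro i0 s texts hlt htexts
    left
    rw [show ((0 : Nat) : Int) = 0 from rfl, add_zero,
      PySem.List.pyRange_one_eq_nil le_rfl]
    exact ⟨rfl, by simp [pvALoop, htexts]⟩
  | succ n ih =>
    intro i0 s texts hlt htexts
    have hcons : PySem.List.pyRange i0 (i0 + ((n + 1 : Nat) : Int)) 1 =
        i0 :: PySem.List.pyRange (i0 + 1) (i0 + ((n + 1 : Nat) : Int)) 1 :=
      PySem.List.pyRange_one_cons (by push_cast; omega)
    have hshift : i0 + ((n + 1 : Nat) : Int) = (i0 + 1) + (n : Int) := by push_cast; ring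
    have h3 := (pvScan_props used i0
      (PySem.List.enumerate ((PySem.List.pyGet? lines i0).getD "").toList) (some s)).2.2 s rfl
    have heq := pvScan_equiv used i0
      (PySem.List.enumerate ((PySem.List.pyGet? lines i0).getD "").toList) (some s)
    cases hr2 : (pvAScan used i0
        (PySem.List.enumerate ((PySem.List.pyGet? lines i0).getD "").toList) (some s)).2 with
    | none =>
      have hA : pvAScan used i0
          (PySem.List.enumerate ((PySem.List.pyGet? lines i0).getD "").toList) (some s) =
          (some s, none) := Prod.ext h3 hr2
      have hBscan : pvRefScan (PySem.Set.ofList used) i0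
          (PySem.List.enumerate ((PySem.List.pyGet? lines i0).getD "").toList) [s] = [s] := by
        simpa [hA] using heq
      rw [hcons, pvALoop_cons_go lines used i0 _ (some s) texts (some s) hA,
        pvRefLoop_cons lines (PySem.Set.ofList used) i0 _ [s] [s] hBscan]
      simp only [Option.isSome_some, if_true, List.length_cons, List.length_nil]
      rw [if_neg (by omega)]
      have htexts' : texts ++ [(PySem.List.pyGet? lines i0).getD ""] =
          (PySem.List.pyRange s.1 (i0 + 1) 1).map
            (fun k => (PySem.List.pyGet? lines k).getD "") := by
        rw [PySem.List.pyRange_one_succ_right (le_of_lt hlt), List.map_append, htexts]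
        simp
      have hih := ih (i0 + 1) s (texts ++ [(PySem.List.pyGet? lines i0).getD ""])
        (by omega) htexts'
      rw [hshift]
      exact hih
    | some e =>
      have hA : pvAScan used i0
          (PySem.List.enumerate ((PySem.List.pyGet? lines i0).getD "").toList) (some s) =
          (some s, some e) := Prod.ext h3 hr2
      have he1 : e.1 = i0 := ((pvScan_props used i0
        (PySem.List.enumerate ((PySem.List.pyGet? lines i0).getD "").toList) (some s)).2.1 e hr2).1
      have hBscan : pvRefScan (PySem.Set.ofList used) i0
          (PySem.List.enumerate ((PySem.List.pyGet? lines i0).getD "").toList) [s] = [s, e] := by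
        simpa [hA] using heq
      rw [hcons, pvALoop_cons_end lines used i0 _ (some s) texts (some s) e hA,
        pvRefLoop_cons lines (PySem.Set.ofList used) i0 _ [s] [s, e] hBscan]
      right
      refine ⟨e, by simp, ?_⟩
      simp only [Option.isSome_some, if_true]
      rw [he1, PySem.List.pyRange_one_succ_right (le_of_lt hlt), List.map_append, htexts]
      simp

theorem pvLoop_start (lines : List String) (used : List (Int × Int)) :
    ∀ (n : Nat) (i0 : Int),
      (pvRefLoop lines (PySem.Set.ofList used) (PySem.List.pyRange i0 (i0 + n) 1) [] = [] ∧
        pvALoop lines used (PySem.List.pyRange i0 (i0 + n) 1) none [] = (none, none, [])) ∨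
      (∃ s : Int × Int,
        pvRefLoop lines (PySem.Set.ofList used) (PySem.List.pyRange i0 (i0 + n) 1) [] = [s] ∧
        pvALoop lines used (PySem.List.pyRange i0 (i0 + n) 1) none [] =
          (some s, none,
            (PySem.List.pyRange s.1 (i0 + n) 1).map (fun k => (PySem.List.pyGet? lines k).getD ""))) ∨
      (∃ s e : Int × Int,
        pvRefLoop lines (PySem.Set.ofList used) (PySem.List.pyRange i0 (i0 + n) 1) [] = [s, e] ∧
        pvALoop lines used (PySem.List.pyRange i0 (i0 + n) 1) none [] =
          (some s, some e,
            (PySem.List.pyRange s.1 (e.1 + 1) 1).map (fun k => (PySem.List.pyGet? lines k).getD ""))) := by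
  intro n
  induction n with
  | zero =>
    intro i0
    left
    rw [show ((0 : Nat) : Int) = 0 from rfl, add_zero,
      PySem.List.pyRange_one_eq_nil le_rfl]
    exact ⟨rfl, by simp [pvALoop]⟩
  | succ n ih =>
    intro i0
    have hcons : PySem.List.pyRange i0 (i0 + ((n + 1 : Nat) : Int)) 1 =
        i0 :: PySem.List.pyRange (i0 + 1) (i0 + ((n + 1 : Nat) : Int)) 1 :=
      PySem.List.pyRange_one_cons (by push_cast; omega)
    have hshift : i0 + ((n + 1 : Nat) : Int) = (i0 + 1) + (n : Int) := by push_cast; ring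
    have hprops := pvScan_props used i0
      (PySem.List.enumerate ((PySem.List.pyGet? lines i0).getD "").toList) (none : Option (Int × Int))
    have heq := pvScan_equiv used i0
      (PySem.List.enumerate ((PySem.List.pyGet? lines i0).getD "").toList) (none : Option (Int × Int))
    cases hr1 : (pvAScan used i0
        (PySem.List.enumerate ((PySem.List.pyGet? lines i0).getD "").toList) none).1 with
    | none =>
      cases hr2 : (pvAScan used i0
          (PySem.List.enumerate ((PySem.List.pyGet? lines i0).getD "").toList) none).2 with
      | some e =>
        exfalso
        have := (hprops.2.1 e hr2).2
        rw [hr1] at this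
        simp at this
      | none =>
        have hA : pvAScan used i0
            (PySem.List.enumerate ((PySem.List.pyGet? lines i0).getD "").toList) none =
            (none, none) := Prod.ext hr1 hr2
        have hBscan : pvRefScan (PySem.Set.ofList used) i0
            (PySem.List.enumerate ((PySem.List.pyGet? lines i0).getD "").toList) [] = [] := by
          simpa [hA] using heq
        rw [hcons, pvALoop_cons_go lines used i0 _ none [] none hA,
          pvRefLoop_cons lines (PySem.Set.ofList used) i0 _ [] [] hBscan]
        simp only [Option.isSome_none, List.length_nil]
        rw [if_neg (by omega), hshift]
        exact ih (i0 + 1)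
    | some s =>
      have hs1 : s.1 = i0 := hprops.1 rfl s hr1
      cases hr2 : (pvAScan used i0
          (PySem.List.enumerate ((PySem.List.pyGet? lines i0).getD "").toList) none).2 with
      | none =>
        have hA : pvAScan used i0
            (PySem.List.enumerate ((PySem.List.pyGet? lines i0).getD "").toList) none =
            (some s, none) := Prod.ext hr1 hr2
        have hBscan : pvRefScan (PySem.Set.ofList used) i0
            (PySem.List.enumerate ((PySem.List.pyGet? lines i0).getD "").toList) [] = [s] := by
          simpa [hA] using heq
        rw [hcons, pvALoop_cons_go lines used i0 _ none [] (some s) hA,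
          pvRefLoop_cons lines (PySem.Set.ofList used) i0 _ [] [s] hBscan]
        simp only [Option.isSome_some, if_true, List.nil_append, List.length_cons, List.length_nil]
        rw [if_neg (by omega)]
        have htexts' : [(PySem.List.pyGet? lines i0).getD ""] =
            (PySem.List.pyRange s.1 (i0 + 1) 1).map
              (fun k => (PySem.List.pyGet? lines k).getD "") := by
          rw [hs1, PySem.List.pyRange_one_singleton]
          simp
        have hst := pvLoop_started lines used n (i0 + 1) s
          [(PySem.List.pyGet? lines i0).getD ""] (by omega) htexts'
        rw [hshift]
        rcases hst with ⟨hB, hAL⟩ | ⟨e, hB, hAL⟩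
        · exact Or.inr (Or.inl ⟨s, hB, hAL⟩)
        · exact Or.inr (Or.inr ⟨s, e, hB, hAL⟩)
      | some e =>
        have he1 : e.1 = i0 := (hprops.2.1 e hr2).1
        have hA : pvAScan used i0
            (PySem.List.enumerate ((PySem.List.pyGet? lines i0).getD "").toList) none =
            (some s, some e) := Prod.ext hr1 hr2
        have hBscan : pvRefScan (PySem.Set.ofList used) i0
            (PySem.List.enumerate ((PySem.List.pyGet? lines i0).getD "").toList) [] = [s, e] := by
          simpa [hA] using heq
        rw [hcons, pvALoop_cons_end lines used i0 _ none [] (some s) e hA,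
          pvRefLoop_cons lines (PySem.Set.ofList used) i0 _ [] [s, e] hBscan]
        refine Or.inr (Or.inr ⟨s, e, by simp, ?_⟩)
        simp only [Option.isSome_some, if_true, List.nil_append]
        rw [he1, hs1, PySem.List.pyRange_one_singleton]
        simp

-- ---- the reference scan is 'take 2' of B's filter pipeline ----

-- per-line unused-semicolon coordinates, in order
def pvLineHits (usedSet : PySem.Set (Int × Int)) (i : Int) (line : List Char) : List (Int × Int) :=
  ((PySem.List.enumerate line).filter
    (fun jc => decide (jc.2 = ';' ∧ (i, jc.1) ∉ usedSet))).map (fun jc => (i, jc.1))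

theorem pvRefScan_take2 (usedSet : PySem.Set (Int × Int)) (i : Int) :
    ∀ (chars : List (Int × Char)) (coords : List (Int × Int)), coords.length ≤ 1 →
      pvRefScan usedSet i chars coords =
        (coords ++ ((chars.filter (fun jc => decide (jc.2 = ';' ∧ (i, jc.1) ∉ usedSet))).map
          (fun jc => (i, jc.1)))).take 2 := by
  intro chars
  induction chars with
  | nil =>
    intro coords h
    simp [pvRefScan, List.take_of_length_le (by omega : coords.length ≤ 2)]
  | cons jc rest ih =>
    intro coords h
    obtain ⟨j, c⟩ := jc
    by_cases hc : c = ';' ∧ (i, j) ∉ usedSet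
    · simp only [pvRefScan, if_pos hc, List.filter_cons,
        decide_eq_true (by exact hc : ((j,c).2 = ';' ∧ (i, (j,c).1) ∉ usedSet)), if_pos trivial,
        List.map_cons]
      by_cases h1 : coords.length = 1
      · rw [if_pos (by simp [h1])]
        rw [List.take_append, List.take_of_length_le (by omega),
          List.take_cons (by omega), h1]
        simp
      · have h0 : coords = [] := by
          cases coords with
          | nil => rfl
          | cons a t =>
            exfalso; simp only [List.length_cons] at h h1; omega
        subst h0
        rw [if_neg (by simp)]
        rw [show ([] : List (Int × Int)) ++ [(i, j)] = [(i, j)] from rfl, ih [(i, j)] (by simp)]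
        simp
    · simp only [pvRefScan, if_neg hc, List.filter_cons]
      rw [decide_eq_false hc]
      exact ih coords h
theorem pvRefLoop_take2 (lines : List String) (usedSet : PySem.Set (Int × Int)) :
    ∀ (idxs : List Int) (coords : List (Int × Int)), coords.length ≤ 1 →
      pvRefLoop lines usedSet idxs coords =
        (coords ++ idxs.flatMap
          (fun i => pvLineHits usedSet i ((PySem.List.pyGet? lines i).getD "").toList)).take 2 := by
  intro idxs
  induction idxs with
  | nil =>
    intro coords h
    simp [pvRefLoop, List.take_of_length_le (by omega : coords.length ≤ 2)]
  | cons i rest ih =>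
    intro coords h
    have hscan := pvRefScan_take2 usedSet i
      (PySem.List.enumerate ((PySem.List.pyGet? lines i).getD "").toList) coords h
    simp only [pvRefLoop, hscan]
    set lh := pvLineHits usedSet i ((PySem.List.pyGet? lines i).getD "").toList with hlhdef
    have hlh2 : ((PySem.List.enumerate ((PySem.List.pyGet? lines i).getD "").toList).filter
          (fun jc => decide (jc.2 = ';' ∧ (i, jc.1) ∉ usedSet))).map (fun jc => (i, jc.1)) = lh := rfl
    rw [hlh2]
    rw [List.flatMap_cons, ← hlhdef, ← List.append_assoc]
    by_cases hlen : 2 ≤ (coords ++ lh).length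
    · rw [if_pos (by rw [List.length_take]; omega)]
      rw [List.take_append (l₁ := coords ++ lh), Nat.sub_eq_zero_of_le hlen]
      simp
    · have hfull : (coords ++ lh).take 2 = coords ++ lh :=
        List.take_of_length_le (by omega)
      rw [hfull, if_neg (by omega), ih (coords ++ lh) (by omega)]
-- ---- B's pipeline computes exactly the flatMap of per-line hits ----

theorem pvJoin_nil_eq_flatten (css : List (List Char)) :
    PySem.Chars.join [] css = css.flatten := by
  induction css with
  | nil => rfl
  | cons c r ih =>
    cases r with
    | nil => simp [PySem.Chars.join_singleton]
    | cons d s => simp_all [PySem.Chars.join_cons_cons]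
theorem pvHits_append (usedSet : PySem.Set (Int × Int)) (c1 c2 : List (Int × Int))
    (b1 b2 : List Char) (h : c1.length = b1.length) :
    pvHits usedSet (c1 ++ c2) (b1 ++ b2) = pvHits usedSet c1 b1 ++ pvHits usedSet c2 b2 := by
  unfold pvHits
  rw [List.zip_append h, List.filter_append, List.map_append]
theorem pvZip_range_enum (i : Int) :
    ∀ (cs : List Char) (st : Int),
      (((PySem.List.pyRange st (st + cs.length) 1).map (fun j => (i, j))).zip cs) =
        (PySem.List.enumerate cs st).map (fun jc => ((i, jc.1), jc.2)) := by
  intro cs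
  induction cs with
  | nil => intro st; simp [PySem.List.pyRange_one_eq_nil le_rfl]
  | cons c rest ih =>
    intro st
    rw [PySem.List.pyRange_one_cons (by
      have h0 : (0:Int) < ((c :: rest).length : Int) := by exact_mod_cast Nat.succ_pos rest.length
      omega), PySem.List.enumerate_cons]
    simp only [List.map_cons, List.zip_cons_cons]
    have : st + ((rest.length + 1 : Nat) : Int) = (st + 1) + (rest.length : Int) := by push_cast; ring
    rw [show ((c :: rest).length : Int) = ((rest.length + 1 : Nat) : Int) by simp, this]
    rw [ih (st + 1)]
theorem pvHits_line (usedSet : PySem.Set (Int × Int)) (i : Int) (cs : List Char) :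
    pvHits usedSet ((PySem.List.pyRange 0 (cs.length : Int) 1).map (fun j => (i, j))) cs =
      pvLineHits usedSet i cs := by
  unfold pvHits pvLineHits
  have hr : PySem.List.pyRange 0 (cs.length : Int) 1 = PySem.List.pyRange 0 (0 + (cs.length : Int)) 1 := by norm_num
  rw [hr, pvZip_range_enum i cs 0, List.filter_map, List.map_map]
  rfl
theorem pvPipeline (usedSet : PySem.Set (Int × Int)) (lineOf : Int → String) (lo : Int) :
    ∀ (n : Nat) (st : Int),
      pvHits usedSet
        ((PySem.List.enumerate ((PySem.List.pyRange (lo + st) (lo + st + n) 1).map lineOf) st).flatMap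
          (fun ks => (PySem.List.pyRange 0 (PySem.Str.len ks.2) 1).map (fun j => (lo + ks.1, j))))
        ((((PySem.List.pyRange (lo + st) (lo + st + n) 1).map lineOf).map String.toList).flatten) =
      (PySem.List.pyRange (lo + st) (lo + st + n) 1).flatMap
        (fun i => pvLineHits usedSet i (lineOf i).toList) := by
  intro n
  induction n with
  | zero =>
    intro st
    rw [show ((0 : Nat) : Int) = 0 from rfl, add_zero, PySem.List.pyRange_one_eq_nil le_rfl]
    simp [pvHits]
  | succ n ih =>
    intro st
    rw [PySem.List.pyRange_one_cons (by push_cast; omega)]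
    simp only [List.map_cons, PySem.List.enumerate_cons, List.flatMap_cons, List.flatten_cons]
    have hlenrw : PySem.Str.len (lineOf (lo + st)) = ((lineOf (lo + st)).toList.length : Int) :=
      PySem.Str.len_eq _
    rw [hlenrw]
    have hlen : ((PySem.List.pyRange 0 ((lineOf (lo + st)).toList.length : Int) 1).map
        (fun j => (lo + st, j))).length = (lineOf (lo + st)).toList.length := by
      rw [List.length_map, PySem.List.pyRange_one]
      simp
    rw [pvHits_append usedSet _ _ _ _ hlen, pvHits_line]
    have hsh1 : lo + st + 1 = lo + (st + 1) := by ring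
    have hsh2 : lo + st + ((n + 1 : Nat) : Int) = lo + (st + 1) + (n : Int) := by push_cast; ring
    rw [hsh1, hsh2, ih (st + 1)]
-- ---- geometry of the flat hit list ----

theorem pvLineHits_fst (usedSet : PySem.Set (Int × Int)) (i : Int) (line : List Char)
    (x : Int × Int) (hx : x ∈ pvLineHits usedSet i line) : x.1 = i := by
  unfold pvLineHits at hx
  obtain ⟨jc, _, rfl⟩ := List.mem_map.mp hx
  rfl

theorem pvFlat_mem (usedSet : PySem.Set (Int × Int)) (lines : List String) (lo : Int) (n : Nat)
    (x : Int × Int)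
    (hx : x ∈ (PySem.List.pyRange lo (lo + n) 1).flatMap
      (fun i => pvLineHits usedSet i ((PySem.List.pyGet? lines i).getD "").toList)) :
    lo ≤ x.1 ∧ x.1 < lo + n := by
  obtain ⟨i, hi, hxi⟩ := List.mem_flatMap.mp hx
  have := pvLineHits_fst usedSet i _ x hxi
  have hb := PySem.List.mem_pyRange_one.mp hi
  omega
theorem pvFlat_pairwise (usedSet : PySem.Set (Int × Int)) (lines : List String) (lo : Int) (n : Nat) :
    ((PySem.List.pyRange lo (lo + n) 1).flatMap
      (fun i => pvLineHits usedSet i ((PySem.List.pyGet? lines i).getD "").toList)).Pairwise (fun a b => a.1 ≤ b.1) := by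
  rw [List.pairwise_flatMap]
  constructor
  · intro i _
    unfold pvLineHits
    refine List.Pairwise.map (R := fun (_ _ : Int × Char) => True) _ (fun a b _ => le_refl i) ?_
    exact List.Pairwise.filter _ (List.pairwise_of_forall (fun _ _ => trivial))
  · have hpr : (PySem.List.pyRange lo (lo + n) 1).Pairwise (· < ·) := by
      rw [PySem.List.pyRange_one]
      exact List.pairwise_lt_range.map _ (fun a b hab => by omega)
    refine hpr.imp_of_mem ?_
    intro i1 i2 h1 h2 hlt x hx y hy
    rw [pvLineHits_fst usedSet i1 _ x hx, pvLineHits_fst usedSet i2 _ y hy]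
    omega
-- ---- offsets ----

def pvSums (c : Int) : List String → List Int
  | [] => [c]
  | s :: r => c :: pvSums (c + PySem.Str.len s) r

theorem pvOffs_foldl (segs : List String) :
    ∀ (pre : List Int) (c : Int),
      segs.foldl (fun offs s => offs ++ [offs.getLastD 0 + PySem.Str.len s]) (pre ++ [c]) =
        pre ++ pvSums c segs := by
  induction segs with
  | nil => intro pre c; simp [pvSums]
  | cons s r ih =>
    intro pre c
    rw [List.foldl_cons]
    have hlast : (pre ++ [c]).getLastD 0 = c := by simp
    rw [hlast, ih (pre ++ [c]) (c + PySem.Str.len s)]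
    simp [pvSums]

theorem pvOffs_eq_sums (segs : List String) : pvOffs segs = pvSums 0 segs := by
  have := pvOffs_foldl segs [] 0
  simpa [pvOffs] using this

theorem pvSums_get :
    ∀ (segs : List String) (c : Int) (k : Nat), k ≤ segs.length →
      (pvSums c segs)[k]? = some (c + (((((segs.take k).map (fun s => s.toList.length)).sum) : Nat) : Int)) := by
  intro segs
  induction segs with
  | nil =>
    intro c k hk
    have : k = 0 := by simpa using hk
    subst this
    simp [pvSums]
  | cons s r ih =>
    intro c k hk
    cases k with
    | zero => simp [pvSums]
    | succ k =>
      simp only [pvSums, List.getElem?_cons_succ, List.take_succ_cons, List.map_cons, List.sum_cons]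
      rw [ih (c + PySem.Str.len s) k (by simpa using hk)]
      congr 1
      rw [PySem.Str.len_eq]
      push_cast
      ring

-- ---- the offset slice of the big string is A's join of the covered lines ----

theorem pvJoin_eq_slice (lines : List String) (lo : Int) (n : Nat)
    (hlen : (lines.length : Int) = lo + n) (s e : Int × Int)
    (hs1 : lo ≤ s.1) (hs2 : s.1 < lo + n) (he1 : lo ≤ e.1) (he2 : e.1 < lo + n) (hse : s.1 ≤ e.1) :
    PySem.Str.join "" ((PySem.List.pyRange s.1 (e.1 + 1) 1).map
        (fun k => (PySem.List.pyGet? lines k).getD "")) =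
      PySem.Str.slice (PySem.Str.join "" (pvSegs lo lines))
        (some ((PySem.List.pyGet? (pvOffs (pvSegs lo lines)) (s.1 - lo)).getD 0))
        (some ((PySem.List.pyGet? (pvOffs (pvSegs lo lines)) (e.1 - lo + 1)).getD 0)) := by
  -- abbreviations
  set lineOf : Int → String := fun i => (PySem.List.pyGet? lines i).getD "" with hlineOf
  have hsegs : pvSegs lo lines = (PySem.List.pyRange lo (lo + n) 1).map lineOf := by
    rw [pvSegs, hlen]
  set segs := pvSegs lo lines with hsegsdef
  have hseglen : segs.length = n := by
    rw [hsegs, List.length_map, PySem.List.pyRange_one, List.length_map, List.length_range]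
    omega
  -- indices
  set k1 := (s.1 - lo).toNat with hk1def
  set k2 := (e.1 - lo).toNat with hk2def
  have hk1 : s.1 - lo = (k1 : Int) := by omega
  have hk2 : e.1 - lo = (k2 : Int) := by omega
  have hk1n : k1 < n := by omega
  have hk2n : k2 < n := by omega
  have hk12 : k1 ≤ k2 := by omega
  -- offsets
  have hoff1 : (PySem.List.pyGet? (pvOffs segs) (s.1 - lo)).getD 0 =
      (((((segs.take k1).map (fun s => s.toList.length)).sum : Nat)) : Int) := by
    rw [hk1, PySem.List.pyGet?_natCast, pvOffs_eq_sums, pvSums_get segs 0 k1 (by omega)]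
    simp only [Option.getD_some, zero_add]
  have hoff2 : (PySem.List.pyGet? (pvOffs segs) (e.1 - lo + 1)).getD 0 =
      (((((segs.take (k2 + 1)).map (fun s => s.toList.length)).sum : Nat)) : Int) := by
    have : e.1 - lo + 1 = ((k2 + 1 : Nat) : Int) := by omega
    rw [this, PySem.List.pyGet?_natCast, pvOffs_eq_sums, pvSums_get segs 0 (k2+1) (by omega)]
    simp only [Option.getD_some, zero_add]
  rw [hoff1, hoff2]
  -- go to lists of chars
  apply String.toList_inj.mp
  rw [PySem.Str.toList_slice]
  rw [PySem.Str.toList_join, PySem.Str.toList_join]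
  simp only [PySem.Chars.slice_eq_listSlice]
  rw [show ("".toList) = ([] : List Char) from rfl]
  rw [pvJoin_nil_eq_flatten, pvJoin_nil_eq_flatten]
  set G := segs.map (fun s => s.toList.length) with hGdef
  have hGtake : ∀ k : Nat, ((segs.take k).map (fun s => s.toList.length)).sum = (G.take k).sum := by
    intro k; rw [hGdef, List.map_take]
  rw [hGtake, hGtake]
  rw [PySem.List.slice_natCast]
  -- texts = (segs.drop k1).take (k2 + 1 - k1)
  have htexts : (PySem.List.pyRange s.1 (e.1 + 1) 1).map lineOf =
      (segs.drop k1).take (k2 + 1 - k1) := by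
    rw [hsegs]
    apply List.ext_getElem
    · simp only [List.length_take, List.length_drop, List.length_map,
        PySem.List.pyRange_one, List.length_range]
      omega
    · intro t h1 h2
      simp only [PySem.List.pyRange_one, List.getElem_take, List.getElem_drop,
        List.getElem_map, List.getElem_range]
      congr 1
      omega
  rw [htexts]
  -- flatten arithmetic
  set L' := segs.map String.toList with hL'def
  have hmapdt : ((segs.drop k1).take (k2 + 1 - k1)).map String.toList =
      (L'.drop k1).take (k2 + 1 - k1) := by
    rw [hL'def, List.map_take, List.map_drop]
  rw [hmapdt]
  have hGlen : G = L'.map List.length := by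
    rw [hGdef, hL'def, List.map_map]; rfl
  -- drop part
  have hdrop : L'.flatten.drop ((G.take k1).sum) = (L'.drop k1).flatten := by
    rw [hGlen, ← List.drop_sum_flatten L' k1]
  -- take part
  have hsum : (G.take (k2 + 1)).sum - (G.take k1).sum =
      (((L'.drop k1).map List.length).take (k2 + 1 - k1)).sum := by
    have hsplit : G.take (k2 + 1) = G.take k1 ++ (G.drop k1).take (k2 + 1 - k1) := by
      rw [← List.take_add]
      congr 1
      omega
    rw [hsplit, List.sum_append, Nat.add_sub_cancel_left, hGlen, List.map_drop]
  rw [hdrop, hsum, List.take_sum_flatten]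
-- ===== VERDICT (by name: the statement is the Claim_ definition above) =====
theorem check_for_semicolon_spec : Claim_equal_check_for_semicolon := by
  intro cli lines used _hdom _hpre
  unfold Spec_check_for_semicolon
  by_cases hab : cli - 1 ≤ (lines.length : Int)
  · obtain ⟨n, hn⟩ : ∃ n : Nat, (lines.length : Int) = (cli - 1) + n :=
      ⟨((lines.length : Int) - (cli - 1)).toNat, by omega⟩
    have hmain := pvLoop_start lines used n (cli - 1)
    have htake := pvRefLoop_take2 lines (PySem.Set.ofList used)
      (PySem.List.pyRange (cli - 1) ((cli - 1) + n) 1) [] (by simp)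
    rw [List.nil_append] at htake
    set flat := (PySem.List.pyRange (cli - 1) ((cli - 1) + n) 1).flatMap
      (fun i => pvLineHits (PySem.Set.ofList used) i ((PySem.List.pyGet? lines i).getD "").toList)
      with hflatdef
    have hsegs : pvSegs (cli - 1) lines =
        (PySem.List.pyRange (cli - 1) ((cli - 1) + n) 1).map
          (fun i => (PySem.List.pyGet? lines i).getD "") := by
      rw [pvSegs, hn]
    have hbig : (PySem.Str.join "" (pvSegs (cli - 1) lines)).toList =
        ((pvSegs (cli - 1) lines).map String.toList).flatten := by
      rw [PySem.Str.toList_join, show ("".toList) = ([] : List Char) from rfl,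
        pvJoin_nil_eq_flatten]
    have hp := pvPipeline (PySem.Set.ofList used)
      (fun i => (PySem.List.pyGet? lines i).getD "") (cli - 1) n 0
    simp only [add_zero] at hp
    have hpipe : pvHits (PySem.Set.ofList used)
        (pvCoordsOf (cli - 1) (pvSegs (cli - 1) lines))
        (PySem.Str.join "" (pvSegs (cli - 1) lines)).toList = flat := by
      rw [hbig, pvCoordsOf, hsegs, hflatdef]
      exact hp
    have hnil2 : ∀ (l : List (Int × Int)), l.take 2 = [] → l = [] := by
      intro l h
      cases l with
      | nil => rfl
      | cons a t => simp at h
    have hone2 : ∀ (l : List (Int × Int)) (x : Int × Int), l.take 2 = [x] → l = [x] := by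
      intro l x h
      cases l with
      | nil => simp at h
      | cons a t =>
        cases t with
        | nil => simpa using h
        | cons b u => simp at h
    have hcons2 : ∀ (l : List (Int × Int)) (x y : Int × Int), l.take 2 = [x, y] →
        ∃ u, l = x :: y :: u := by
      intro l x y h
      cases l with
      | nil => simp at h
      | cons a t =>
        cases t with
        | nil => simp at h
        | cons b u =>
          simp only [List.take_succ_cons, List.take_zero, List.cons.injEq, and_true] at h
          exact ⟨u, by rw [h.1, h.2]⟩
    rcases hmain with ⟨hRef, hA⟩ | ⟨s, hRef, hA⟩ | ⟨s, e, hRef, hA⟩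
    · have hflat : flat = [] := hnil2 flat (by rw [← htake, hRef])
      simp only [check_for_semicolon, check_for_semicolon_alt]
      rw [hn, hA, hpipe, hflat]
    · have hflat : flat = [s] := hone2 flat s (by rw [← htake, hRef])
      simp only [check_for_semicolon, check_for_semicolon_alt]
      rw [hn, hA, hpipe, hflat]
    · obtain ⟨u, hflat⟩ : ∃ u, flat = s :: e :: u :=
        hcons2 flat s e (by rw [← htake, hRef])
      have hsm : s ∈ flat := by rw [hflat]; simp
      have hem : e ∈ flat := by rw [hflat]; simp
      have hsb := pvFlat_mem (PySem.Set.ofList used) lines (cli - 1) n s hsm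
      have heb := pvFlat_mem (PySem.Set.ofList used) lines (cli - 1) n e hem
      have hse : s.1 ≤ e.1 := by
        have hpw := pvFlat_pairwise (PySem.Set.ofList used) lines (cli - 1) n
        rw [← hflatdef, hflat, List.pairwise_cons] at hpw
        exact hpw.1 e (by simp)
      have hJG := pvJoin_eq_slice lines (cli - 1) n hn s e hsb.1 hsb.2 heb.1 heb.2 hse
      simp only [check_for_semicolon, check_for_semicolon_alt]
      rw [hn, hA, hpipe, hflat]
      simp only [hJG]
  · have hnil : PySem.List.pyRange (cli - 1) (lines.length : Int) 1 = [] :=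
      PySem.List.pyRange_one_eq_nil (by omega)
    have hsegs0 : pvSegs (cli - 1) lines = [] := by
      rw [pvSegs, hnil, List.map_nil]
    simp only [check_for_semicolon, check_for_semicolon_alt]
    rw [hnil, hsegs0]
    simp [pvALoop, pvCoordsOf, pvHits, PySem.List.enumerate]
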